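-- pv_equiv track=rewrite | github.com/taoliu/SCKMER | CTA/remove_simplerepeat.py | is_simplerepeat
-- ===== SOURCE A (Python) =====
-- def is_simplerepeat ( kmer ):
--     l = len(kmer)
--     for simple_repeat_l in range( 1, l//2 + 1 ):
--         is_repetitive = True
--         repeat = kmer[:simple_repeat_l]
--         for check_s in range( simple_repeat_l, l - l % simple_repeat_l, simple_repeat_l ):
--             chunk = kmer[ check_s: check_s+simple_repeat_l ]
--             is_repetitive = is_repetitive and (repeat == kmer[ check_s: check_s+simple_repeat_l ])
--         # check the last chunk
--         chunk = kmer[ check_s + simple_repeat_l: ]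
--         is_repetitive = is_repetitive and ( repeat[ : len(chunk) ] == chunk )
--         if is_repetitive:
--             #print (f"{kmer} simple repeat {repeat}")
--             return True
--     return False
-- ===== SOURCE B (Python) =====
-- def is_simplerepeat(kmer):
--     # A string has a simple repeat of period p iff it equals itself shifted by p,
--     # i.e. kmer[p:] == kmer[:len(kmer)-p]; test every period up to len//2.
--     l = len(kmer)
--     return any(kmer[p:] == kmer[:l - p] for p in range(1, l // 2 + 1))
-- ===== Notes on version B (the rewrite author's own statement) =====
-- stated objective: simpler
-- what changed: Replaces the per-period chunk-by-chunk scan (inner loop comparing every length-p block plus a separate tail check) by a single self-overlap slice comparison kmer[p:] == kmer[:l-p] per candidate period.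
import Mathlib
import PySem

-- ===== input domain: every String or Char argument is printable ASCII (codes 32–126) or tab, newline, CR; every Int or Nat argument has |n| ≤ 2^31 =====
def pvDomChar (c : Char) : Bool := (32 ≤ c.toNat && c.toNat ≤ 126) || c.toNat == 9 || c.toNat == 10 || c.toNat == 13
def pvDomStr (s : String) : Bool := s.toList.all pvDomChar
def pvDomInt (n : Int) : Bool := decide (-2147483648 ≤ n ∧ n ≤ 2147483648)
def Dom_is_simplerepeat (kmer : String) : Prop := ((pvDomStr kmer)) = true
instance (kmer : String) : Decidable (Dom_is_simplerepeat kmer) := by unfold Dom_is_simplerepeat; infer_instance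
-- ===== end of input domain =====

-- B replaces A's chunk-by-chunk period scan by one self-overlap slice comparison per period (same result, simpler).

-- ===== PORT A =====
-- Literal port of A on kmer.toList. The inner for-loop carries (is_repetitive, check_s);
-- check_s is initialised with the dummy 0: in Python it is unassigned before the loop, but for
-- every p the loop ranges over, the inner range is nonempty, so the dummy is never exposed.
-- The early 'return True' of the outer loop is the Bool-valued List.any.
def is_simplerepeat (kmer : String) : Bool :=
  let s := kmer.toList
  let l : Int := PySem.List.len s
  (PySem.List.pyRange 1 (PySem.Int.floordiv l 2 + 1) 1).any (fun simple_repeat_l =>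
    let rpt := PySem.List.slice s none (some simple_repeat_l)
    let st := (PySem.List.pyRange simple_repeat_l (l - PySem.Int.mod l simple_repeat_l)
                 simple_repeat_l).foldl
        (fun (st : Bool × Int) check_s =>
          let chunk := PySem.List.slice s (some check_s) (some (check_s + simple_repeat_l))
          (st.1 && (rpt == chunk), check_s)) (true, 0)
    -- check the last chunk
    let chunk := PySem.List.slice s (some (st.2 + simple_repeat_l)) none
    st.1 && (PySem.List.slice rpt none (some (PySem.List.len chunk)) == chunk))

-- ===== PORT B =====
-- Literal port of Source B: any(kmer[p:] == kmer[:l-p] for p in range(1, l//2+1)).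
def is_simplerepeat_alt (kmer : String) : Bool :=
  let s := kmer.toList
  let l : Int := PySem.List.len s
  (PySem.List.pyRange 1 (PySem.Int.floordiv l 2 + 1) 1).any (fun p =>
    PySem.List.slice s (some p) none == PySem.List.slice s none (some (l - p)))

-- ===== PRECONDITION & SPEC =====
def Spec_is_simplerepeat (kmer : String) (out : Bool) : Prop := out = is_simplerepeat_alt kmer
instance (kmer : String) (out : Bool) : Decidable (Spec_is_simplerepeat kmer out) := by unfold Spec_is_simplerepeat; infer_instance

-- ===== CLAIM (what is proved, stated in full; the proofs are below) =====
def Claim_equal_is_simplerepeat : Prop := ∀ (kmer : String), Dom_is_simplerepeat kmer → Spec_is_simplerepeat kmer (is_simplerepeat kmer)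

-- ===== LEMMAS AND PROOFS =====

-- The inner for-loop of A: conjunction of the chunk checks, last index as second component.
theorem foldl_and_last {α : Type} (xs : List α) (f : α → Bool) (b : Bool) (c : α) :
    xs.foldl (fun (st : Bool × α) x => (st.1 && f x, x)) (b, c)
      = (b && xs.all f, xs.getLastD c) := by
  induction xs generalizing b c with
  | nil => simp
  | cons y ys ih =>
    simp only [List.foldl_cons, ih, List.all_cons, Bool.and_assoc]
    cases ys <;> simp [List.getLast?_cons]

-- shift-by-p property, as getElem? equations
def PyShiftP (s : List Char) (p : Nat) : Prop := ∀ i, i + p < s.length → s[i + p]? = s[i]?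

-- iterated shift
theorem shift_iter {s : List Char} {p : Nat} (h : PyShiftP s p) :
    ∀ k i, i + k * p < s.length → s[i + k * p]? = s[i]? := by
  intro k
  induction k with
  | zero => simp
  | succ k ih =>
    intro i hi
    have h1 : i + k * p + p < s.length := by ring_nf; ring_nf at hi; omega
    have := h (i + k * p) h1
    have h2 : i + (k+1) * p = i + k * p + p := by ring
    rw [h2, this]
    exact ih i (by omega)

-- mod-p property
def PyModP (s : List Char) (p : Nat) : Prop := ∀ t, t < s.length → s[t]? = s[t % p]?

theorem shift_iff_mod {s : List Char} {p : Nat} (hp : 0 < p) : PyShiftP s p ↔ PyModP s p := by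
  constructor
  · intro h t ht
    have hdm := Nat.div_add_mod t p
    have hcomm : p * (t / p) = t / p * p := Nat.mul_comm _ _
    have ht' : t % p + (t / p) * p < s.length := by omega
    have := shift_iter h (t / p) (t % p) ht'
    have he : t % p + t / p * p = t := by omega
    rwa [he] at this
  · intro h i hi
    have h1 := h (i + p) hi
    have h2 := h i (by omega)
    rw [h1, h2, Nat.add_mod_right]

-- B's test per period p equals PyShiftP
theorem bside_iff {s : List Char} {p : Nat} (hp2 : 2 * p ≤ s.length) :
    (s.drop p = s.take (s.length - p)) ↔ PyShiftP s p := by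
  constructor
  · intro h i hi
    have := congrArg (fun xs => xs[i]?) h
    simp only [List.getElem?_drop, List.getElem?_take] at this
    rw [Nat.add_comm p i] at this
    rw [this, if_pos (by omega)]
  · intro h
    apply List.ext_getElem?
    intro i
    simp only [List.getElem?_drop, List.getElem?_take]
    by_cases hi : i < s.length - p
    · rw [if_pos hi, Nat.add_comm p i, h i (by omega)]
    · rw [if_neg hi, List.getElem?_eq_none (by omega)]

-- A's test per period p (chunks all equal + tail) equals PyModP
theorem aside_iff {s : List Char} {p : Nat} (hp : 0 < p) :
    ((∀ k, 1 ≤ k → k < s.length / p → (s.drop (k * p)).take p = s.take p) ∧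
      s.take (s.length % p) = s.drop (s.length / p * p)) ↔ PyModP s p := by
  have hdm : s.length / p * p + s.length % p = s.length := by
    have h1 := Nat.div_add_mod s.length p
    have h2 : p * (s.length / p) = s.length / p * p := Nat.mul_comm _ _
    omega
  have hrlt : s.length % p < p := Nat.mod_lt _ hp
  constructor
  · rintro ⟨hch, htl⟩ t ht
    by_cases hbig : s.length / p * p ≤ t
    · -- t lies in the last (partial) chunk
      have hj : t - s.length / p * p < s.length % p := by omega
      have hx := congrArg (fun xs => xs[t - s.length / p * p]?) htl
      simp only [List.getElem?_take, List.getElem?_drop, if_pos hj] at hx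
      have he : s.length / p * p + (t - s.length / p * p) = t := by omega
      rw [he] at hx
      have hm2 : t % p = t - s.length / p * p := by
        conv_lhs => rw [← he]
        rw [Nat.mul_add_mod']
        exact Nat.mod_eq_of_lt (by omega)
      rw [hm2]
      exact hx.symm
    · -- t lies in a full chunk k = t / p
      have hlt : t < s.length / p * p := by omega
      have htp : t / p * p + t % p = t := by
        have h1 := Nat.div_add_mod t p
        have h2 : p * (t / p) = t / p * p := Nat.mul_comm _ _
        omega
      have hj : t % p < p := Nat.mod_lt _ hp
      by_cases hk0 : t / p = 0
      · rw [hk0] at htp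
        simp only [Nat.zero_mul, Nat.zero_add] at htp
        rw [htp]
      · have hk1 : 1 ≤ t / p := Nat.one_le_iff_ne_zero.mpr hk0
        have hklt : t / p < s.length / p := by
          by_contra hc
          have hc' : s.length / p ≤ t / p := Nat.not_lt.mp hc
          have : s.length / p * p ≤ t / p * p := Nat.mul_le_mul_right p hc'
          omega
        have hx := congrArg (fun xs => xs[t % p]?) (hch (t / p) hk1 hklt)
        simp only [List.getElem?_take, List.getElem?_drop, if_pos hj] at hx
        rw [htp] at hx
        exact hx
  · intro h
    constructor
    · intro k hk1 hklt
      apply List.ext_getElem?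
      intro j
      simp only [List.getElem?_take, List.getElem?_drop]
      by_cases hj : j < p
      · simp only [if_pos hj]
        have hexp : (k + 1) * p = k * p + p := by ring
        have hstep : (k + 1) * p ≤ s.length / p * p := Nat.mul_le_mul_right p (by omega)
        have hin : k * p + j < s.length := by omega
        have h1 := h (k * p + j) hin
        rw [h1, Nat.mul_add_mod', Nat.mod_eq_of_lt hj]
      · simp only [if_neg hj]
    · apply List.ext_getElem?
      intro j
      simp only [List.getElem?_take, List.getElem?_drop]
      by_cases hj : j < s.length % p
      · simp only [if_pos hj]
        have hin : s.length / p * p + j < s.length := by omega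
        have h1 := h (s.length / p * p + j) hin
        rw [h1, Nat.mul_add_mod', Nat.mod_eq_of_lt (by omega)]
      · simp only [if_neg hj]; rw [List.getElem?_eq_none (by omega)]

-- pointwise equality of the two per-period tests, for p in the scanned range
theorem body_eq (s : List Char) (pn : Nat) (hp1 : 1 ≤ pn) (hp2 : pn ≤ s.length / 2) :
    ((fun simple_repeat_l =>
      let rpt := PySem.List.slice s none (some simple_repeat_l)
      let st := (PySem.List.pyRange simple_repeat_l
                   ((s.length : Int) - PySem.Int.mod (s.length : Int) simple_repeat_l)
                   simple_repeat_l).foldl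
          (fun (st : Bool × Int) check_s =>
            let chunk := PySem.List.slice s (some check_s) (some (check_s + simple_repeat_l))
            (st.1 && (rpt == chunk), check_s)) (true, 0)
      let chunk := PySem.List.slice s (some (st.2 + simple_repeat_l)) none
      st.1 && (PySem.List.slice rpt none (some (PySem.List.len chunk)) == chunk)) ((pn : Int)))
    = (PySem.List.slice s (some (pn : Int)) none
        == PySem.List.slice s none (some ((s.length : Int) - (pn : Int)))) := by
  have hpn0 : 0 < pn := hp1
  have h2p : 2 * pn ≤ s.length := by omega
  have hm2 : 2 ≤ s.length / pn := (Nat.le_div_iff_mul_le hpn0).mpr (by omega)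
  obtain ⟨m', hm'⟩ : ∃ m', s.length / pn = m' + 2 := ⟨s.length / pn - 2, by omega⟩
  have hr : s.length % pn < pn := Nat.mod_lt _ hpn0
  have hdm : s.length / pn * pn + s.length % pn = s.length := by
    have h1 := Nat.div_add_mod s.length pn
    have h2 : pn * (s.length / pn) = s.length / pn * pn := Nat.mul_comm _ _
    omega
  -- the inner range of A: pn, 2*pn, …, (m'+1)*pn
  have hsub : (s.length : Int) - PySem.Int.mod (s.length : Int) (pn : Int)
      = (((m' + 2) * pn : Nat) : Int) := by
    rw [PySem.Int.mod_natCast]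
    have h3 : (m' + 2) * pn = s.length - s.length % pn := by rw [← hm']; omega
    rw [h3]
    omega
  have he1 : (m' + 2) * pn = (m' + 1) * pn + pn := by ring
  have he2 : 1 ≤ (m' + 1) * pn := Nat.mul_pos (by omega) hpn0
  have hdiveq : ((m' + 2) * pn - 1) / pn = m' + 1 := by
    have e3 : (m' + 2) * pn - 1 = pn * (m' + 1) + (pn - 1) := by
      have e4 : (m' + 2) * pn = pn * (m' + 1) + pn := by ring
      omega
    rw [e3, Nat.mul_add_div hpn0, Nat.div_eq_of_lt (by omega), Nat.add_zero]
  have hrange : PySem.List.pyRange (pn : Int) (((m' + 2) * pn : Nat) : Int) (pn : Int)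
      = (List.range (m' + 1)).map (fun k => ((pn : Int) + (pn : Int) * (k : Nat))) := by
    rw [PySem.List.pyRange_of_pos _ _ (by exact_mod_cast hpn0)]
    congr 1
    rw [if_pos (by exact_mod_cast (by omega : (pn : Nat) < (m' + 2) * pn))]
    have : (((m' + 2) * pn : Nat) : Int) - (pn : Int) + (pn : Int) - 1
        = (((m' + 2) * pn - 1 : Nat) : Int) := by omega
    rw [this, ← Int.natCast_ediv, hdiveq, Int.toNat_natCast]
  simp only [hsub, hrange]
  rw [foldl_and_last]
  have hgl : ((List.range (m' + 1)).map (fun k => ((pn : Int) + (pn : Int) * (k : Nat)))).getLastD 0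
      = (pn : Int) + (pn : Int) * ((m' : Nat) : Int) := by
    rw [List.range_succ, List.map_append, List.map_cons, List.map_nil, List.getLastD_concat]
  simp only [hgl, Bool.true_and, List.all_map, Function.comp_def]
  -- normalise all the slices
  have hsl_rpt : PySem.List.slice s none (some (pn : Int)) = s.take pn :=
    PySem.List.slice_to_natCast s pn
  have hsl_chunk : ∀ k : Nat, PySem.List.slice s (some ((pn : Int) + (pn : Int) * (k : Nat)))
      (some ((pn : Int) + (pn : Int) * (k : Nat) + (pn : Int)))
      = (s.drop ((k + 1) * pn)).take pn := by
    intro k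
    have e1 : (pn : Int) + (pn : Int) * (k : Nat) = (((k + 1) * pn : Nat) : Int) := by
      push_cast; ring
    have e2 : (pn : Int) + (pn : Int) * (k : Nat) + (pn : Int)
        = (((k + 1) * pn + pn : Nat) : Int) := by push_cast; ring
    rw [e2, e1, PySem.List.slice_natCast]
    congr 1
    omega
  have hlast : (pn : Int) + (pn : Int) * ((m' : Nat) : Int) + (pn : Int)
      = (((m' + 2) * pn : Nat) : Int) := by push_cast; ring
  have hsl_tail : PySem.List.slice s (some (((m' + 2) * pn : Nat) : Int)) none
      = s.drop ((m' + 2) * pn) := PySem.List.slice_from_natCast s _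
  have hlen_tail : PySem.List.len (s.drop ((m' + 2) * pn)) = ((s.length % pn : Nat) : Int) := by
    rw [PySem.List.len_eq, List.length_drop]
    congr 1
    rw [← hm']
    omega
  have hsl_head : PySem.List.slice (s.take pn) none (some ((s.length % pn : Nat) : Int))
      = s.take (s.length % pn) := by
    rw [PySem.List.slice_to_natCast, List.take_take, Nat.min_eq_left (by omega)]
  have hsl_b1 : PySem.List.slice s (some (pn : Int)) none = s.drop pn :=
    PySem.List.slice_from_natCast s pn
  have hsl_b2 : PySem.List.slice s none (some ((s.length : Int) - (pn : Int)))
      = s.take (s.length - pn) := by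
    have e : (s.length : Int) - (pn : Int) = ((s.length - pn : Nat) : Int) := by omega
    rw [e, PySem.List.slice_to_natCast]
  rw [hlast, hsl_tail, hsl_rpt, hlen_tail, hsl_head, hsl_b1, hsl_b2]
  simp only [hsl_chunk]
  -- now a pure statement about take/drop; move to Prop and use the three bridges
  rw [Bool.eq_iff_iff]
  simp only [Bool.and_eq_true, List.all_eq_true, List.mem_range, beq_iff_eq]
  have hbig : ((∀ k, 1 ≤ k → k < m' + 2 → (s.drop (k * pn)).take pn = s.take pn) ∧
      s.take (s.length % pn) = s.drop ((m' + 2) * pn)) ↔ PyModP s pn := by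
    have h := aside_iff (s := s) (p := pn) hpn0
    rw [hm'] at h
    exact h
  constructor
  · rintro ⟨hch, htail⟩
    apply (bside_iff h2p).mpr
    apply (shift_iff_mod hpn0).mpr
    apply hbig.mp
    refine ⟨fun k hk1 hklt => ?_, htail⟩
    obtain ⟨k', rfl⟩ : ∃ k', k = k' + 1 := ⟨k - 1, by omega⟩
    exact (hch k' (by omega)).symm
  · intro hb'
    have h1 := hbig.mpr ((shift_iff_mod hpn0).mp ((bside_iff h2p).mp hb'))
    exact ⟨fun k hk => (h1.1 (k + 1) (by omega) (by omega)).symm, h1.2⟩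

-- ===== VERDICT (by name: the statement is the Claim_ definition above) =====
theorem is_simplerepeat_spec : Claim_equal_is_simplerepeat := by
  intro kmer _
  unfold Spec_is_simplerepeat
  simp only [is_simplerepeat, is_simplerepeat_alt, PySem.List.len_eq]
  apply PySem.List.any_congr_mem
  intro x hx
  rw [PySem.List.mem_pyRange_one] at hx
  obtain ⟨hx1, hx2⟩ := hx
  have hfd : PySem.Int.floordiv ((kmer.toList.length : Nat) : Int) 2
      = ((kmer.toList.length / 2 : Nat) : Int) := by
    exact_mod_cast PySem.Int.floordiv_natCast kmer.toList.length 2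
  rw [hfd] at hx2
  obtain ⟨pn, rfl⟩ : ∃ pn : Nat, x = (pn : Int) := ⟨x.toNat, by omega⟩
  exact body_eq kmer.toList pn (by exact_mod_cast hx1) (by omega)
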